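-- pv_equiv track=rewrite | github.com/sofieremi/Codewars | parts_of_list.py | partlist
-- ===== SOURCE A (Python) =====
-- def partlist(arr):
--     result = []
--     start_str = arr[0]
--     next_str = ' '.join(arr[1:])
--     test = next_str.split()
--     for i in range(len(arr) - 1):
--         result.append((start_str, ' '.join(test)))
--         start_str += ' ' + test[0]
--         test.pop(0)
--     return result
-- ===== SOURCE B (Python) =====
-- def partlist(arr):
--     first = arr[0]
--     words = ' '.join(arr[1:]).split()
--     n = len(arr) - 1
--     rights = []
--     acc = ' '.join(words[n:])
--     for i in range(n - 1, -1, -1):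
--         acc = words[i] + ' ' + acc if acc else words[i]
--         rights.insert(0, acc)
--     lefts = [' '.join([first] + words[:i]) for i in range(n)]
--     return list(zip(lefts, rights))
-- ===== Notes on version B (the rewrite author's own statement) =====
-- stated objective: alternative
-- what changed: B zips two independently built columns — left prefixes by slicing the precomputed word list, right suffixes by one back-to-front string accumulation — instead of A's single forward loop that mutates start_str, pops from the word list and appends to result.
import Mathlib
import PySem

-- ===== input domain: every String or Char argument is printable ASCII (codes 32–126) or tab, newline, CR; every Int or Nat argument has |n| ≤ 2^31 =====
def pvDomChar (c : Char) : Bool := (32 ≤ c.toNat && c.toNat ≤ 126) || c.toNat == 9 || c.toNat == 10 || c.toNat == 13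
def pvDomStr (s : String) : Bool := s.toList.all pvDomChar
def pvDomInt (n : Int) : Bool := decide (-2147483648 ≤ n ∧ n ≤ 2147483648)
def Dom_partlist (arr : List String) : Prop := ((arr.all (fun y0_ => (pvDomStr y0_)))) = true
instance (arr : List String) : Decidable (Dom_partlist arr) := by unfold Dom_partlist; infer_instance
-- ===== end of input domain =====

-- B builds the left and right columns independently (prefix slices; suffixes by one
-- back-to-front accumulation) and zips them, instead of A's forward loop mutating three
-- variables; equivalence is proved on exactly the inputs where the Python A returns.

-- ===== PORT A =====
-- the for-loop of A: state = (result, start_str, test); the [] branch is where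
-- Python's test[0] would raise IndexError (excluded by Pre_partlist)
def partlistLoop : Nat → List (String × String) → String → List String → List (String × String)
  | 0, result, _, _ => result
  | Nat.succ k, result, start_str, test =>
    let result := result ++ [(start_str, PySem.Str.join " " test)]
    match test with
    | [] => result
    | t :: ts => partlistLoop k result (start_str ++ " " ++ t) ts

def partlist (arr : List String) : List (String × String) :=
  match arr with
  | [] => []   -- Python: arr[0] raises IndexError here; excluded by Pre_partlist
  | a :: rest =>
    partlistLoop rest.length [] a (PySem.Str.split₀ (PySem.Str.join " " rest))

-- ===== PORT B =====
-- B's backward loop 'for i in range(n-1, -1, -1)': counter k means index i = k-1;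
-- the .getD "" is where Python's words[i] would raise IndexError (excluded by Pre_partlist)
def partlistRightsGo (words : List String) : Nat → String → List String → List String
  | 0, _, rights => rights
  | Nat.succ i, acc, rights =>
    let w := (PySem.List.pyGet? words (Int.ofNat i)).getD ""
    let acc' := if acc = "" then w else w ++ " " ++ acc
    partlistRightsGo words i acc' (acc' :: rights)

def partlist_alt (arr : List String) : List (String × String) :=
  match arr with
  | [] => []   -- Python: first = arr[0] raises IndexError here; excluded by Pre_partlist
  | first :: rest =>
    let words := PySem.Str.split₀ (PySem.Str.join " " rest)
    let n := rest.length
    let rights := partlistRightsGo words n (PySem.Str.join " " (words.drop n)) []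
    let lefts := (List.range n).map (fun i => PySem.Str.join " " ([first] ++ words.take i))
    lefts.zip rights

-- ===== PRECONDITION & SPEC =====
-- Pre_ is exactly the set of inputs on which the Pythons return: both raise IndexError on
-- the empty list (arr[0]) and when the tail's whitespace-word count is below len(arr)-1 (A's test[0],
-- B's words[i]).
def Pre_partlist (arr : List String) : Prop :=
  arr ≠ [] ∧ arr.length - 1 ≤ (PySem.Str.split₀ (PySem.Str.join " " (arr.drop 1))).length
instance (arr : List String) : Decidable (Pre_partlist arr) := by unfold Pre_partlist; infer_instance
def pvWitness_partlist : List String := ["a", "b c", "d"]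

def Spec_partlist (arr : List String) (out : List (String × String)) : Prop := out = partlist_alt arr
instance (arr : List String) (out : List (String × String)) : Decidable (Spec_partlist arr out) := by unfold Spec_partlist; infer_instance

-- ===== CLAIM (what is proved, stated in full; the proofs are below) =====
def Claim_equal_partlist : Prop := ∀ (arr : List String), Dom_partlist arr → Pre_partlist arr → Spec_partlist arr (partlist arr)

-- ===== LEMMAS AND PROOFS =====

-- ' '.join on char lists merges its two leading parts
theorem chars_join_merge (sep a b : List Char) (l : List (List Char)) :
    PySem.Chars.join sep (a :: b :: l) = PySem.Chars.join sep ((a ++ sep ++ b) :: l) := by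
  cases l with
  | nil => simp [PySem.Chars.join_cons_cons, PySem.Chars.join_singleton]
  | cons q r => simp [PySem.Chars.join_cons_cons]

theorem str_join_merge (a b : String) (l : List String) :
    PySem.Str.join " " (a :: b :: l) = PySem.Str.join " " ((a ++ " " ++ b) :: l) := by
  apply String.ext
  simp [PySem.Str.toList_join, chars_join_merge]

theorem str_join_single (a : String) : PySem.Str.join " " [a] = a := by
  apply String.ext
  simp [PySem.Str.toList_join, PySem.Chars.join_singleton]

-- every word produced by str.split() is nonempty (split₀ never emits an empty piece)
theorem split₀_go_ne_nil : ∀ (s cur : List Char) (acc : List (List Char)),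
    (∀ w ∈ acc, w ≠ []) → ∀ w ∈ PySem.Chars.split₀.go s cur acc, w ≠ [] := by
  intro s
  induction s with
  | nil =>
    intro cur acc hacc w hw
    simp only [PySem.Chars.split₀.go] at hw
    split at hw
    · simp at hw; exact hacc _ (by simpa using hw)
    · rename_i hcur
      simp only [List.mem_reverse, List.mem_cons] at hw
      rcases hw with h | h
      · subst h; simpa [List.isEmpty_iff] using hcur
      · exact hacc _ h
  | cons c rest ih =>
    intro cur acc hacc w hw
    simp only [PySem.Chars.split₀.go] at hw
    split at hw
    · split at hw
      · exact ih _ _ hacc _ hw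
      · rename_i hcur
        refine ih _ _ ?_ _ hw
        intro v hv
        rcases List.mem_cons.mp hv with h | h
        · subst h; simpa [List.isEmpty_iff] using hcur
        · exact hacc _ h
    · exact ih _ _ hacc _ hw

theorem split₀_words_ne_empty (s : String) : ∀ w ∈ PySem.Str.split₀ s, w ≠ "" := by
  intro w hw hcontra
  have h1 : w.toList ∈ List.map String.toList (PySem.Str.split₀ s) := List.mem_map_of_mem hw
  rw [PySem.Str.split₀_map_toList] at h1
  have := split₀_go_ne_nil s.toList [] [] (by simp) w.toList h1
  subst hcontra
  simp at this

-- a join of nonempty words is empty only for the empty word list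
theorem str_join_eq_empty (l : List String) (hne : ∀ w ∈ l, w ≠ "") :
    PySem.Str.join " " l = "" → l = [] := by
  intro h
  match l with
  | [] => rfl
  | [a] =>
    rw [str_join_single] at h
    exact absurd h (hne a (by simp))
  | a :: b :: r =>
    exfalso
    have htl := congrArg String.toList h
    simp [PySem.Str.toList_join, PySem.Chars.join_cons_cons] at htl

theorem str_join_cons_cons (a b : String) (l : List String) :
    PySem.Str.join " " (a :: b :: l) = a ++ " " ++ PySem.Str.join " " (b :: l) := by
  apply String.ext
  simp [PySem.Str.toList_join, PySem.Chars.join_cons_cons]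

-- characterisation of A's loop: each produced pair depends only on the index
theorem partlistLoop_eq (n : Nat) :
    ∀ (test : List String) (result : List (String × String)) (start : String),
      n ≤ test.length →
      partlistLoop n result start test =
        result ++ (List.range n).map (fun i =>
          (PySem.Str.join " " (start :: test.take i),
           PySem.Str.join " " (test.drop i))) := by
  induction n with
  | zero => intro test result start _; simp [partlistLoop]
  | succ k ih =>
    intro test result start h
    match test with
    | [] => simp at h
    | t :: ts =>
      have hk : k ≤ ts.length := by simpa using h
      rw [List.range_succ_eq_map]
      simp only [partlistLoop, ih ts _ _ hk, List.map_cons, List.map_map, List.take_zero,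
        List.drop_zero, str_join_single, List.append_assoc, List.singleton_append]
      congr 1
      congr 1
      refine List.map_congr_left fun i _ => ?_
      simp [Function.comp, str_join_merge]

-- characterisation of B's backward loop: it produces the suffix joins in index order
theorem partlistRightsGo_eq (words : List String) (hne : ∀ w ∈ words, w ≠ "") :
    ∀ (k : Nat), k ≤ words.length → ∀ (rights : List String),
      partlistRightsGo words k (PySem.Str.join " " (words.drop k)) rights =
        ((List.range k).map (fun i => PySem.Str.join " " (words.drop i))) ++ rights := by
  intro k
  induction k with
  | zero => intro _ rights; simp [partlistRightsGo]
  | succ j ih =>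
    intro hk rights
    have hj : j < words.length := hk
    have hne' : ∀ w ∈ words.drop (j + 1), w ≠ "" :=
      fun w hw => hne w (List.mem_of_mem_drop hw)
    have hdrop : List.drop j words = words[j] :: List.drop (j + 1) words :=
      (List.getElem_cons_drop hj).symm
    simp only [partlistRightsGo, PySem.List.pyGet?_natCast, Int.ofNat_eq_natCast,
      List.getElem?_eq_getElem hj, Option.getD_some]
    have hacc : (if PySem.Str.join " " (List.drop (j + 1) words) = "" then words[j]
        else words[j] ++ " " ++ PySem.Str.join " " (List.drop (j + 1) words))
        = PySem.Str.join " " (List.drop j words) := by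
      split
      · rename_i hempty
        have hnil := str_join_eq_empty _ hne' hempty
        rw [hdrop, hnil, str_join_single]
      · rename_i hnonempty
        match hd : List.drop (j + 1) words with
        | [] =>
          rw [hd] at hnonempty
          exact absurd (by decide) hnonempty
        | b :: r => rw [hdrop, hd, str_join_cons_cons]
    rw [hacc, ih (Nat.le_of_lt hj)]
    rw [List.range_succ, List.map_append]
    simp

-- ===== VERDICT (by name: the statement is the Claim_ definition above) =====
theorem partlist_spec : Claim_equal_partlist := by
  intro arr _ hpre
  obtain ⟨hne0, hlen⟩ := hpre
  match arr with
  | [] => exact absurd rfl hne0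
  | a :: rest =>
    show partlist (a :: rest) = partlist_alt (a :: rest)
    simp only [partlist, partlist_alt]
    have hw : rest.length ≤ (PySem.Str.split₀ (PySem.Str.join " " rest)).length := by
      simpa using hlen
    have hnw := split₀_words_ne_empty (PySem.Str.join " " rest)
    rw [partlistLoop_eq _ _ _ _ hw, partlistRightsGo_eq _ hnw _ hw, List.append_nil,
      List.zip_map']
    simp
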